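-- pv_equiv track=rewrite | github.com/mshadianto/slr | agents/narrative_orchestrator.py | _auto_cluster_papers
-- ===== SOURCE A (Python) =====
-- from typing import Dict, List, Any, Optional
--
-- def _auto_cluster_papers(papers: List[Dict]) -> str:
--     """Auto-cluster papers by year or simple heuristics."""
--     if not papers:
--         return "Tidak ada paper untuk di-cluster"
--
--     by_year = {}
--     for p in papers:
--         year = p.get('year', 'Unknown')
--         if year not in by_year:
--             by_year[year] = []
--         by_year[year].append(p.get('title', 'Untitled'))
--
--     result = []
--     for year in sorted(by_year.keys(), reverse=True):
--         titles = by_year[year][:3]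
--         result.append(f"**{year}** ({len(by_year[year])} studi): {', '.join(titles[:2])}...")
--
--     return "\n".join(result)
-- ===== SOURCE B (Python) =====
-- from typing import Dict, List, Any, Optional
--
-- def _auto_cluster_papers(papers: List[Dict]) -> str:
--     """Auto-cluster papers by year or simple heuristics."""
--     if not papers:
--         return "Tidak ada paper untuk di-cluster"
--
--     lines = []
--     for year in sorted({p.get('year', 'Unknown') for p in papers}, reverse=True):
--         group = [p for p in papers if p.get('year', 'Unknown') == year]
--         titles = [p.get('title', 'Untitled') for p in group[:2]]
--         lines.append(f"**{year}** ({len(group)} studi): {', '.join(titles)}...")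
--     return "\n".join(lines)
-- ===== Notes on version B (the rewrite author's own statement) =====
-- stated objective: simpler
-- what changed: Replaces A's one-pass dict-of-lists grouping followed by key sorting with sorting the distinct years descending and filtering the paper list once per year, so no intermediate dict is built.
import Mathlib
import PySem

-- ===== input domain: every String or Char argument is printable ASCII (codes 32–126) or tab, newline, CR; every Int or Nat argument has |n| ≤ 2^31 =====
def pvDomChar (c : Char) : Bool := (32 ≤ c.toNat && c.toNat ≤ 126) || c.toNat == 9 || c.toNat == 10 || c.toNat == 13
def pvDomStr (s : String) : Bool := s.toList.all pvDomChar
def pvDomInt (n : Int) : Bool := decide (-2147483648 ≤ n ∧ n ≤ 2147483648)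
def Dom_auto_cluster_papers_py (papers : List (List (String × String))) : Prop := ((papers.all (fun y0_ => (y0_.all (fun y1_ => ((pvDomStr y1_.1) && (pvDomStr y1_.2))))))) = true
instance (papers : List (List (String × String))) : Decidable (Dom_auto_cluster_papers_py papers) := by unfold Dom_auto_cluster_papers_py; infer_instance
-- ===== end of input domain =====

-- B replaces A's dict-of-lists grouping pass with sorted distinct years plus a per-year filter
-- (objective: simpler — shorter, no intermediate dict); return values proved equal on all inputs.

-- p.get(k, dflt) on a dict of strings: first-match lookup in the association list (type convention)
def pvGet (p : List (String × String)) (k dflt : String) : String :=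
  match p.find? (fun kv => kv.1 == k) with
  | some kv => kv.2
  | none => dflt

-- ===== PORT A =====
def auto_cluster_papers_py (papers : List (List (String × String))) : String :=
  if papers = [] then "Tidak ada paper untuk di-cluster"
  else
    let by_year : PySem.Dict String (List String) := papers.foldl (fun d p =>
      let year := pvGet p "year" "Unknown"
      let d := if d.contains year then d else d.insert year []
      -- by_year[year].append(p.get('title', 'Untitled'))
      d.modify year [] (fun ts => ts ++ [pvGet p "title" "Untitled"])) PySem.Dict.empty
    let result := (PySem.List.sorted by_year.keys (fun k => k) true).foldl
      (fun res year =>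
        -- by_year[year]: the key is always present here, so getD is value-exact
        let titles := PySem.List.slice (by_year.getD year []) none (some 3)
        res ++ ["**" ++ year ++ "** (" ++ PySem.Int.toStr ((by_year.getD year []).length : Int)
                ++ " studi): " ++ PySem.Str.join ", " (PySem.List.slice titles none (some 2)) ++ "..."]) []
    PySem.Str.join "\n" result

-- ===== PORT B =====
def auto_cluster_papers_py_alt (papers : List (List (String × String))) : String :=
  if papers = [] then "Tidak ada paper untuk di-cluster"
  else
    let lines := (PySem.List.sorted
        (PySem.Set.ofList (papers.map (fun p => pvGet p "year" "Unknown"))) (fun y => y) true).foldl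
      (fun lines year =>
        let group := papers.filter (fun p => pvGet p "year" "Unknown" == year)
        let titles := (PySem.List.slice group none (some 2)).map (fun p => pvGet p "title" "Untitled")
        lines ++ ["**" ++ year ++ "** (" ++ PySem.Int.toStr (group.length : Int)
                  ++ " studi): " ++ PySem.Str.join ", " titles ++ "..."]) []
    PySem.Str.join "\n" lines

-- ===== PRECONDITION & SPEC =====
def Spec_auto_cluster_papers_py (papers : List (List (String × String))) (out : String) : Prop := out = auto_cluster_papers_py_alt papers
instance (papers : List (List (String × String))) (out : String) : Decidable (Spec_auto_cluster_papers_py papers out) := by unfold Spec_auto_cluster_papers_py; infer_instance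

-- ===== CLAIM (what is proved, stated in full; the proofs are below) =====
def Claim_equal_auto_cluster_papers_py : Prop := ∀ (papers : List (List (String × String))), Dom_auto_cluster_papers_py papers → Spec_auto_cluster_papers_py papers (auto_cluster_papers_py papers)

-- ===== LEMMAS AND PROOFS =====

-- A's loop body ('ensure key, then append') is one dict write: d[y] = d.get(y, []) + [t].
theorem pv_stepA_modify (d : PySem.Dict String (List String)) (y t : String) :
    (if d.contains y then d else d.insert y []).modify y [] (fun ts => ts ++ [t])
      = d.modify y [] (fun ts => ts ++ [t]) := by
  by_cases h : d.contains y
  · simp [h]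
  · have h' : d.contains y = false := by simpa using h
    simp [h', PySem.Dict.modify, PySem.Dict.getD_insert_self,
      PySem.Dict.insert_insert_self, PySem.Dict.getD_of_not_contains d [] h']

-- The grouping fold over papers, re-indexed over (year, title) pairs.
theorem pv_foldl_pairs (papers : List (List (String × String))) (d : PySem.Dict String (List String)) :
    papers.foldl (fun d p =>
        d.modify (pvGet p "year" "Unknown") [] (fun ts => ts ++ [pvGet p "title" "Untitled"])) d
      = (papers.map (fun p => (pvGet p "year" "Unknown", pvGet p "title" "Untitled"))).foldl
          (fun d q => d.modify q.1 [] (fun ts => ts ++ [q.2])) d := by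
  induction papers generalizing d with
  | nil => rfl
  | cons p rest ih => simp [ih]

-- A's by_year dict, characterised: its keys and its per-year title lists.
theorem pv_by_year_getD (papers : List (List (String × String))) (y : String) :
    (papers.foldl (fun d p =>
        let year := pvGet p "year" "Unknown"
        let d := if d.contains year then d else d.insert year []
        d.modify year [] (fun ts => ts ++ [pvGet p "title" "Untitled"])) PySem.Dict.empty).getD y []
      = (papers.filter (fun p => pvGet p "year" "Unknown" == y)).map
          (fun p => pvGet p "title" "Untitled") := by
  have hf : (fun (d : PySem.Dict String (List String)) (p : List (String × String)) =>
        let year := pvGet p "year" "Unknown"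
        let d := if d.contains year then d else d.insert year []
        d.modify year [] (fun ts => ts ++ [pvGet p "title" "Untitled"]))
      = (fun d p => d.modify (pvGet p "year" "Unknown") [] (fun ts => ts ++ [pvGet p "title" "Untitled"])) := by
    funext d p
    exact pv_stepA_modify d _ _
  rw [hf, pv_foldl_pairs]
  rw [PySem.Dict.getD_foldl_modify_append]
  simp [List.filter_map, Function.comp_def, List.map_map]

theorem pv_by_year_keys (papers : List (List (String × String))) :
    (papers.foldl (fun d p =>
        let year := pvGet p "year" "Unknown"
        let d := if d.contains year then d else d.insert year []
        d.modify year [] (fun ts => ts ++ [pvGet p "title" "Untitled"])) PySem.Dict.empty).keys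
      = PySem.Set.ofList (papers.map (fun p => pvGet p "year" "Unknown")) := by
  have hf : (fun (d : PySem.Dict String (List String)) (p : List (String × String)) =>
        let year := pvGet p "year" "Unknown"
        let d := if d.contains year then d else d.insert year []
        d.modify year [] (fun ts => ts ++ [pvGet p "title" "Untitled"]))
      = (fun d p => d.modify (pvGet p "year" "Unknown") [] (fun ts => ts ++ [pvGet p "title" "Untitled"])) := by
    funext d p
    exact pv_stepA_modify d _ _
  rw [hf]
  rw [PySem.Dict.keys_foldl_modify_key papers (fun p => pvGet p "year" "Unknown") []
    (fun _ p => (fun ts => ts ++ [pvGet p "title" "Untitled"]))]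
  simp [PySem.Set.update_nil_left]

-- The formatted line agrees for every year: count = group size, titles[:3][:2] = first two titles.
theorem pv_line_eq (papers : List (List (String × String))) (y : String) :
    ("**" ++ y ++ "** ("
      ++ PySem.Int.toStr ((((papers.filter (fun p => pvGet p "year" "Unknown" == y)).map
            (fun p => pvGet p "title" "Untitled")).length : Int))
      ++ " studi): "
      ++ PySem.Str.join ", " (PySem.List.slice
            (PySem.List.slice ((papers.filter (fun p => pvGet p "year" "Unknown" == y)).map
              (fun p => pvGet p "title" "Untitled")) none (some 3)) none (some 2)) ++ "...")
    = ("**" ++ y ++ "** ("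
      ++ PySem.Int.toStr (((papers.filter (fun p => pvGet p "year" "Unknown" == y)).length : Int))
      ++ " studi): "
      ++ PySem.Str.join ", " ((PySem.List.slice
            (papers.filter (fun p => pvGet p "year" "Unknown" == y)) none (some 2)).map
              (fun p => pvGet p "title" "Untitled")) ++ "...") := by
  rw [PySem.List.slice_to _ (by norm_num : (0:Int) ≤ 3), PySem.List.slice_to _ (by norm_num : (0:Int) ≤ 2),
      PySem.List.slice_to _ (by norm_num : (0:Int) ≤ 2)]
  simp [List.take_take, List.map_take, List.length_map]

-- ===== VERDICT (by name: the statement is the Claim_ definition above) =====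
theorem auto_cluster_papers_py_spec : Claim_equal_auto_cluster_papers_py := by
  intro papers _
  unfold Spec_auto_cluster_papers_py auto_cluster_papers_py auto_cluster_papers_py_alt
  by_cases hnil : papers = []
  · simp [hnil]
  · simp only [if_neg hnil]
    rw [pv_by_year_keys]
    simp only [pv_by_year_getD]
    rw [PySem.List.foldl_append_singleton_eq_map, PySem.List.foldl_append_singleton_eq_map]
    congr 1
    apply List.map_congr_left
    intro y _
    exact pv_line_eq papers y
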